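-- pv_equiv track=rewrite | github.com/simonfqy/SimonfqyGitHub | lintcode/easy/1079_count_binary_substrings.py | check_exist_contiguous
-- ===== SOURCE A (Python) =====
-- def check_exist_contiguous(s):
--     first_counter = 0
--     second_counter = 0
--     for char in s:
--         if char == s[0]:
--             if second_counter > 0:
--                 return False
--             first_counter += 1
--         else:
--             second_counter += 1
--             if second_counter == first_counter:
--                 return True
--     return False
-- ===== SOURCE B (Python) =====
-- def check_exist_contiguous(s):
--     if not s:
--         return False
--     k = 0
--     for ch in s:
--         if ch != s[0]:
--             break
--         k += 1
--     return len(s) >= 2 * k and all(ch != s[0] for ch in s[k:2 * k])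
-- ===== Notes on version B (the rewrite author's own statement) =====
-- stated objective: simpler
-- what changed: Replaced A's interleaved two-counter state machine with a leading-run-length computation followed by a fixed-window check that s[k:2k] contains no s[0].
import Mathlib
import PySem

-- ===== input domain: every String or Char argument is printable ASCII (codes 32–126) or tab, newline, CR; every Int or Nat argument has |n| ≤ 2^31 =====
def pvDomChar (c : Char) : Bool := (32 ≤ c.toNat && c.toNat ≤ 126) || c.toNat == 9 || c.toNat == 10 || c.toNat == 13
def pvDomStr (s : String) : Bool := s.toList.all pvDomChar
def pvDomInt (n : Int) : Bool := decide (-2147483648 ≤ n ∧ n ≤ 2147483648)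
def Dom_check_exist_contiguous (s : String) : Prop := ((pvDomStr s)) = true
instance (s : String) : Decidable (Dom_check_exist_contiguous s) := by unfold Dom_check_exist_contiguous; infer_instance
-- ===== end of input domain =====

-- B replaces A's interleaved two-counter state machine by a leading-run-length
-- computation followed by a window check (objective: simpler).

-- ===== PORT A =====
-- A's for-loop with two counters and early returns, as structural recursion over
-- the characters; c0 is s[0] (never demanded on the empty string, as in A).
def pvGoA (c0 : Char) : List Char → Int → Int → Bool
  | [], _, _ => false
  | ch :: rest, first, second =>
    if ch == c0 then
      if second > 0 then false
      else pvGoA c0 rest (first + 1) second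
    else
      let second' := second + 1
      if second' == first then true
      else pvGoA c0 rest first second'

def check_exist_contiguous (s : String) : Bool :=
  match s.toList with
  | [] => false
  | c0 :: _ => pvGoA c0 s.toList 0 0

-- ===== PORT B =====
-- k = 0; for ch in s: if ch != s[0]: break; k += 1
def pvLeadRun (c0 : Char) : List Char → Nat
  | [] => 0
  | ch :: rest => if ch ≠ c0 then 0 else pvLeadRun c0 rest + 1

-- s[k:2*k] with 0 ≤ k ≤ 2*k is exactly (drop k).take k (Python slice clamping
-- coincides with take/drop clamping for nonnegative bounds).
def check_exist_contiguous_alt (s : String) : Bool :=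
  match s.toList with
  | [] => false
  | c0 :: _ =>
    let l := s.toList
    let k := pvLeadRun c0 l
    decide (2 * k ≤ l.length) && ((l.drop k).take k).all (fun ch => ch ≠ c0)

-- ===== PRECONDITION & SPEC =====
def Spec_check_exist_contiguous (s : String) (out : Bool) : Prop := out = check_exist_contiguous_alt s
instance (s : String) (out : Bool) : Decidable (Spec_check_exist_contiguous s out) := by unfold Spec_check_exist_contiguous; infer_instance

-- ===== CLAIM (what is proved, stated in full; the proofs are below) =====
def Claim_equal_check_exist_contiguous : Prop := ∀ (s : String), Dom_check_exist_contiguous s → Spec_check_exist_contiguous s (check_exist_contiguous s)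

-- ===== LEMMAS AND PROOFS =====

theorem pvLeadRun_le_length (c0 : Char) (t : List Char) : pvLeadRun c0 t ≤ t.length := by
  induction t with
  | nil => simp [pvLeadRun]
  | cons c r ih =>
    simp only [pvLeadRun, List.length_cons]
    split
    · omega
    · omega

theorem pvLeadRun_drop_head (c0 : Char) (t : List Char) :
    ∀ d r, t.drop (pvLeadRun c0 t) = d :: r → d ≠ c0 := by
  induction t with
  | nil => intro d r h; simp at h
  | cons c rest ih =>
    intro d r h
    simp only [pvLeadRun] at h
    by_cases hc : c = c0
    · subst hc
      simp [List.drop_succ_cons] at h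
      exact ih d r h
    · simp [hc] at h
      rw [← h.1]; exact hc

-- Phase 1: while the characters equal c0 (and second = 0), A just increments first.
theorem pvGoA_phase1 (c0 : Char) (t : List Char) (f : Int) :
    pvGoA c0 t f 0 = pvGoA c0 (t.drop (pvLeadRun c0 t)) (f + (pvLeadRun c0 t : Int)) 0 := by
  induction t generalizing f with
  | nil => simp [pvLeadRun]
  | cons c r ih =>
    by_cases hc : c = c0
    · have h1 : pvGoA c0 (c :: r) f 0 = pvGoA c0 r (f + 1) 0 := by
        simp [pvGoA, hc]
      have h2 : pvLeadRun c0 (c :: r) = pvLeadRun c0 r + 1 := by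
        simp [pvLeadRun, hc]
      rw [h1, ih, h2, List.drop_succ_cons]
      congr 1
      push_cast
      ring
    · simp [pvLeadRun, hc]

-- Phase 2: with 1 ≤ second < first, A returns true iff the next (first − second)
-- characters exist and all differ from c0.
theorem pvGoA_phase2 (c0 : Char) (rest : List Char) :
    ∀ f sec : Int, 1 ≤ sec → sec < f →
    pvGoA c0 rest f sec =
      (decide ((f - sec) ≤ (rest.length : Int)) &&
        (rest.take (f - sec).toNat).all (fun ch => ch ≠ c0)) := by
  induction rest with
  | nil =>
    intro f sec h1 h2
    simp [pvGoA]
    omega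
  | cons d r ih =>
    intro f sec h1 h2
    by_cases hd : d = c0
    · have hsec : (0:Int) < sec := by omega
      have htk : ∃ m, (f - sec).toNat = m + 1 := by
        refine ⟨(f - sec).toNat - 1, ?_⟩; omega
      obtain ⟨m, hm⟩ := htk
      simp [pvGoA, hd, hsec, hm]
    · by_cases heq : sec + 1 = f
      · have hA : pvGoA c0 (d :: r) f sec = true := by
          simp [pvGoA, hd, heq]
        have htk : (f - sec).toNat = 1 := by omega
        have hlen : (f - sec) ≤ ((d :: r).length : Int) := by simp; omega
        simp [hA, htk, hd]
        omega
      · have hlt : sec + 1 < f := by omega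
        have hA : pvGoA c0 (d :: r) f sec = pvGoA c0 r f (sec + 1) := by
          simp [pvGoA, hd, heq]
        rw [hA, ih f (sec + 1) (by omega) hlt]
        have htk : ∃ m, (f - sec).toNat = m + 1 ∧ (f - (sec + 1)).toNat = m := by
          refine ⟨(f - (sec+1)).toNat, by omega, rfl⟩
        obtain ⟨m, hm1, hm2⟩ := htk
        have hlen : ((f - (sec+1)) ≤ ((r.length : Nat) : Int)) ↔ ((f - sec) ≤ (((d :: r).length : Nat) : Int)) := by
          simp; omega
        simp only [hm1, hm2, List.take_succ_cons, List.all_cons]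
        by_cases hL : (f - (sec+1)) ≤ ((r.length : Nat) : Int)
        · have hL' := hlen.mp hL
          simp [hL, hd]
          intro _
          simp only [List.length_cons] at hL'
          push_cast at hL' ⊢
          omega
        · have hL' : ¬ ((f - sec) ≤ (((d :: r).length : Nat) : Int)) := fun h => hL (hlen.mpr h)
          simp [hL]
          intro h
          exfalso
          simp only [List.length_cons] at hL'
          push_cast at hL' h
          omega

-- the core list-level equality for a nonempty string
theorem pvMain (c0 : Char) (t : List Char) :
    pvGoA c0 (c0 :: t) 0 0 =
      (decide (2 * pvLeadRun c0 (c0 :: t) ≤ (c0 :: t).length) &&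
        (((c0 :: t).drop (pvLeadRun c0 (c0 :: t))).take (pvLeadRun c0 (c0 :: t))).all
          (fun ch => ch ≠ c0)) := by
  have hk : pvLeadRun c0 (c0 :: t) = pvLeadRun c0 t + 1 := by simp [pvLeadRun]
  set k0 := pvLeadRun c0 t with hk0
  have hstep : pvGoA c0 (c0 :: t) 0 0 = pvGoA c0 t 1 0 := by simp [pvGoA]
  rw [hstep, pvGoA_phase1 c0 t 1, hk, List.drop_succ_cons]
  have hkle : k0 ≤ t.length := pvLeadRun_le_length c0 t
  cases hrest : t.drop k0 with
  | nil =>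
    have hlen : t.length = k0 := by
      have := congrArg List.length hrest
      simp at this; omega
    simp [pvGoA, hlen]
  | cons d r =>
    have hd : d ≠ c0 := pvLeadRun_drop_head c0 t d r hrest
    have hlen : t.length = k0 + (1 + r.length) := by
      have := congrArg List.length hrest
      simp at this; omega
    by_cases hk00 : k0 = 0
    · -- first = 1; second' = 1 = first ⇒ true immediately
      have hA : pvGoA c0 (d :: r) (1 + (k0 : Int)) 0 = true := by
        simp [pvGoA, hd, hk00]
      rw [hA]
      simp [hk00, hd, hlen]
    · -- first = 1 + k0 > 1; enter phase 2 with second = 1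
      have hA : pvGoA c0 (d :: r) (1 + (k0 : Int)) 0 = pvGoA c0 r (1 + (k0 : Int)) 1 := by
        simp [pvGoA, hd]
        intro h
        exact absurd h hk00
      rw [hA, pvGoA_phase2 c0 r (1 + (k0 : Int)) 1 (by omega) (by omega)]
      have ht1 : (1 + (k0 : Int) - 1).toNat = k0 := by omega
      have ht2 : ((1 + (k0 : Int) - 1) ≤ ((r.length : Nat) : Int)) ↔ (2 * (k0 + 1) ≤ (c0 :: t).length) := by
        simp [hlen]; omega
      rw [ht1]
      by_cases hL : 2 * (k0 + 1) ≤ (c0 :: t).length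
      · have e1 : k0 ≤ r.length := by
          simp only [List.length_cons] at hL; omega
        have e2 : 2 * (k0 + 1) ≤ t.length + 1 := by
          simp only [List.length_cons] at hL; omega
        simp [e1, e2, hd]
      · have e1 : ¬ k0 ≤ r.length := by
          simp only [List.length_cons] at hL; omega
        have e2 : ¬ 2 * (k0 + 1) ≤ t.length + 1 := by
          simp only [List.length_cons] at hL; omega
        simp [e1, e2]

-- ===== VERDICT (by name: the statement is the Claim_ definition above) =====
theorem check_exist_contiguous_spec : Claim_equal_check_exist_contiguous := by
  intro s _
  unfold Spec_check_exist_contiguous check_exist_contiguous check_exist_contiguous_alt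
  cases h : s.toList with
  | nil => simp
  | cons c0 t => simpa using pvMain c0 t
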